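-- pv_equiv track=rewrite | github.com/stvsever/ThesisMaster | utils/official/cluster_criterions/03_hierarchically_cluster_items.py | _split_first_csv_field
-- ===== SOURCE A (Python) =====
-- from typing import List, Set, Tuple, Dict, Optional
--
-- def _split_first_csv_field(line: str) -> Tuple[str, str]:
--     """
--     Fast split of a CSV line into (first_field, remainder_after_first_comma),
--     correctly handling quotes and escaped double quotes in the first field.
--     Assumptions:
--     - Only the first field may contain commas/quotes.
--     - All remaining fields are numeric and unquoted.
--     """
--     s = line.rstrip("\n\r")
--     if not s:
--         return "", ""
--
--     if s[0] != '"':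
--         i = s.find(",")
--         if i == -1:
--             return s, ""
--         return s[:i], s[i + 1 :]
--
--     # Quoted first field
--     i = 1
--     out_chars: List[str] = []
--     while i < len(s):
--         ch = s[i]
--         if ch == '"':
--             # escaped quote?
--             if i + 1 < len(s) and s[i + 1] == '"':
--                 out_chars.append('"')
--                 i += 2
--                 continue
--
--             # end quote
--             i += 1
--             if i < len(s) and s[i] == ",":
--                 return "".join(out_chars), s[i + 1 :]
--             # tolerate any stray chars until comma
--             while i < len(s) and s[i] != ",":
--                 i += 1
--             if i < len(s) and s[i] == ",":
--                 return "".join(out_chars), s[i + 1 :]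
--             return "".join(out_chars), ""
--         else:
--             out_chars.append(ch)
--             i += 1
--
--     return "".join(out_chars), ""
-- ===== SOURCE B (Python) =====
-- def _split_first_csv_field(line):
--     # Simpler decomposition: partition() for the unquoted case, and for a quoted
--     # first field a single consumption of the characters kept on a stack
--     # (pop = next char), with dropWhile-style skipping of strays after the close.
--     s = line.rstrip("\n\r")
--     if s[:1] != '"':
--         head, _, tail = s.partition(",")
--         return head, tail
--     buf = []
--     stack = list(s[:0:-1])  # chars after the opening quote, reversed; pop() yields them left-to-right
--     while stack:
--         c = stack.pop()
--         if c != '"':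
--             buf.append(c)
--         elif stack and stack[-1] == '"':
--             stack.pop()
--             buf.append('"')
--         else:
--             # field closed: drop stray chars up to the next comma (or the end)
--             while stack and stack[-1] != ',':
--                 stack.pop()
--             if stack:
--                 stack.pop()
--             return "".join(buf), "".join(reversed(stack))
--     return "".join(buf), ""
-- ===== Notes on version B (the rewrite author's own statement) =====
-- stated objective: simpler
-- what changed: Replaces A's find() fast path plus index-arithmetic while-loop (with a nested stray-skipping while and four return sites) by str.partition for the unquoted case and, for a quoted field, one uniform consumption of the remaining characters kept on a stack with a dropWhile-style skip after the closing quote.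
import Mathlib
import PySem

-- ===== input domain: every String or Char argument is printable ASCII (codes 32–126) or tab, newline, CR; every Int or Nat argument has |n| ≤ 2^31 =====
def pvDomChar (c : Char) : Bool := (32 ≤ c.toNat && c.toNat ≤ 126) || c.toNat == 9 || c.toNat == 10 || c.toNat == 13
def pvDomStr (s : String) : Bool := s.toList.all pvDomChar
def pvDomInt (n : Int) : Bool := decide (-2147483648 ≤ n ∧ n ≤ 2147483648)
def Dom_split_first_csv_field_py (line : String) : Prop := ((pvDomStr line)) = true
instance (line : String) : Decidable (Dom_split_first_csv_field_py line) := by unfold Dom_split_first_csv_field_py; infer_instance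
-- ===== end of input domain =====

-- B replaces A's find() fast path and index-loop by partition + a uniform stack consumption: simpler decomposition, same cost.

-- ===== PORT A =====
-- line.rstrip("\n\r"): drop trailing '\n'/'\r' chars (hand port, exact; shared by both ports since both Pythons start with this call)
def pyRstripNR (s : List Char) : List Char :=
  (s.reverse.dropWhile (fun c => c = '\n' ∨ c = '\r')).reverse

-- the inner `while i < len(s) and s[i] != ",": i += 1` of A: first index j ≥ i with s[j] = ',' (or len)
def aSkip (s : List Char) (i : Nat) : Nat :=
  if h : i < s.length then (if s[i] = ',' then i else aSkip s (i + 1)) else i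
termination_by s.length - i

-- A's quoted-field while loop, index i into s, accumulator out_chars
-- (Python's `i + 1 < len(s) and s[i+1] == '"'` and `i < len(s) and s[i] == ","` are written via getElem?, exact)
def aQuoted (s : List Char) (i : Nat) (out : List Char) : List Char × List Char :=
  if h : i < s.length then
    let ch := s[i]
    if ch = '"' then
      if s[i + 1]? = some '"' then
        aQuoted s (i + 2) (out ++ ['"'])              -- escaped quote
      else if s[i + 1]? = some ',' then (out, s.drop (i + 2))   -- end quote, comma right after
      else
        let j := aSkip s (i + 1)                      -- tolerate strays until comma
        if s[j]? = some ',' then (out, s.drop (j + 1)) else (out, [])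
    else
      aQuoted s (i + 1) (out ++ [ch])
  else (out, [])
termination_by s.length - i

def split_first_csv_field_py (line : String) : String × String :=
  let s := pyRstripNR line.toList
  if s = [] then ("", "")
  else if PySem.List.pyGet? s 0 ≠ some '"' then
    let i := PySem.Chars.find s [',']
    if i = -1 then (String.ofList s, "")
    else (String.ofList (PySem.List.slice s none (some i)),
          String.ofList (PySem.List.slice s (some (i + 1)) none))
  else
    let (f, r) := aQuoted s 1 []
    (String.ofList f, String.ofList r)

-- ===== PORT B =====
-- s.partition(",") restricted to (head, tail): text before the first ',' and text after it (hand port, exact)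
def bPartComma (s : List Char) : List Char × List Char :=
  (s.takeWhile (fun c => c ≠ ','), (s.dropWhile (fun c => c ≠ ',')).drop 1)

-- B's stack loop; the Python keeps the remaining characters as a reversed stack (pop = next char,
-- "".join(reversed(stack)) = remaining text), ported as the remaining list in order — exact
def bConsume : List Char → List Char → List Char × List Char
  | [], buf => (buf, [])
  | c :: t, buf =>
    if c ≠ '"' then bConsume t (buf ++ [c])
    else if t.head? = some '"' then bConsume t.tail (buf ++ ['"'])
    else (buf, (t.dropWhile (fun x => x ≠ ',')).drop 1)
termination_by t _ => t.length
decreasing_by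
  all_goals (simp [List.length_tail]; try omega)

def split_first_csv_field_py_alt (line : String) : String × String :=
  let s := pyRstripNR line.toList
  if PySem.List.slice s none (some 1) ≠ ['"'] then   -- s[:1] != '"'
    let (h, t) := bPartComma s
    (String.ofList h, String.ofList t)
  else
    let (f, r) := bConsume (s.drop 1) []             -- list(s[:0:-1]) as stack = s[1:] consumed left-to-right
    (String.ofList f, String.ofList r)

-- ===== PRECONDITION & SPEC =====
def Spec_split_first_csv_field_py (line : String) (out : String × String) : Prop := out = split_first_csv_field_py_alt line
instance (line : String) (out : String × String) : Decidable (Spec_split_first_csv_field_py line out) := by unfold Spec_split_first_csv_field_py; infer_instance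

-- ===== CLAIM (what is proved, stated in full; the proofs are below) =====
def Claim_equal_split_first_csv_field_py : Prop := ∀ (line : String), Dom_split_first_csv_field_py line → Spec_split_first_csv_field_py line (split_first_csv_field_py line)

-- ===== LEMMAS AND PROOFS =====

lemma prefix_singleton_iff (a : Char) (l : List Char) : ([a] <+: l) ↔ l[0]? = some a := by
  cases l with
  | nil => simp
  | cons b t => simp [List.cons_prefix_cons, eq_comm]

lemma infix_singleton_iff (a : Char) (l : List Char) : ([a] <:+: l) ↔ a ∈ l := by
  constructor
  · intro h; exact List.singleton_sublist.mp h.sublist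
  · intro h
    obtain ⟨p, q, hpq⟩ := List.append_of_mem h
    exact ⟨p, q, by simp [hpq]⟩

lemma find_singleton_cons (a c : Char) (u : List Char) :
    PySem.Chars.find (c :: u) [a] =
      if c = a then 0
      else if PySem.Chars.find u [a] = -1 then -1 else PySem.Chars.find u [a] + 1 := by
  by_cases hc : c = a
  · subst hc
    rw [if_pos rfl]
    have hnn : 0 ≤ PySem.Chars.find (c :: u) [c] :=
      (PySem.Chars.find_nonneg_iff _ _).mpr ((infix_singleton_iff _ _).mpr (by simp))
    obtain ⟨hpre, hmin⟩ := PySem.Chars.find_spec hnn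
    by_cases h0 : (PySem.Chars.find (c :: u) [c]).toNat = 0
    · omega
    · exact absurd ((prefix_singleton_iff c (c :: u)).mpr (by simp))
        (by simpa using hmin 0 (by omega))
  · rw [if_neg hc]
    by_cases hu : PySem.Chars.find u [a] = -1
    · rw [if_pos hu]
      have hnu : a ∉ u := by
        have := (PySem.Chars.find_eq_neg_one_iff u [a]).mp hu
        rwa [infix_singleton_iff] at this
      refine (PySem.Chars.find_eq_neg_one_iff _ _).mpr ?_
      rw [infix_singleton_iff]
      simp [hnu]
      intro h; exact hc h.symm
    · rw [if_neg hu]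
      have hj0 : 0 ≤ PySem.Chars.find u [a] := by
        have := PySem.Chars.neg_one_le_find u [a]; omega
      obtain ⟨hpreu, hminu⟩ := PySem.Chars.find_spec hj0
      have hmem : a ∈ u := List.mem_of_getElem? (l := u) (i := (PySem.Chars.find u [a]).toNat) (by
        have := (prefix_singleton_iff a _).mp hpreu
        simpa [List.getElem?_drop] using this)
      have hnn : 0 ≤ PySem.Chars.find (c :: u) [a] :=
        (PySem.Chars.find_nonneg_iff _ _).mpr ((infix_singleton_iff _ _).mpr (by simp [hmem]))
      obtain ⟨hpre, hmin⟩ := PySem.Chars.find_spec hnn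
      have hfne0 : (PySem.Chars.find (c :: u) [a]).toNat ≠ 0 := by
        intro h0
        rw [h0, List.drop_zero] at hpre
        exact hc ((by simpa using (prefix_singleton_iff a (c :: u)).mp hpre) : c = a)
      have hlt : ¬ ((PySem.Chars.find (c :: u) [a]).toNat - 1 < (PySem.Chars.find u [a]).toNat) := by
        intro hlt
        refine hminu _ hlt ?_
        have h' := hpre
        rw [show (PySem.Chars.find (c :: u) [a]).toNat
              = ((PySem.Chars.find (c :: u) [a]).toNat - 1) + 1 by omega,
            List.drop_succ_cons] at h'
        exact h'
      have hgt : ¬ ((PySem.Chars.find u [a]).toNat < (PySem.Chars.find (c :: u) [a]).toNat - 1) := by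
        intro hgt
        refine hmin ((PySem.Chars.find u [a]).toNat + 1) (by omega) ?_
        rw [List.drop_succ_cons]
        exact hpreu
      omega

-- A's unquoted branch equals B's partition
lemma part_eq (s : List Char) :
    (if PySem.Chars.find s [','] = -1 then (s, ([] : List Char))
     else (PySem.List.slice s none (some (PySem.Chars.find s [','])),
           PySem.List.slice s (some (PySem.Chars.find s [','] + 1)) none))
    = bPartComma s := by
  induction s with
  | nil => simp [bPartComma, show PySem.Chars.find [] [','] = -1 from by decide]
  | cons c u ih =>
    rw [find_singleton_cons]
    by_cases hc : c = ','
    · subst hc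
      rw [if_pos rfl, if_neg (by norm_num : (0 : Int) ≠ -1)]
      rw [PySem.List.slice_to _ le_rfl, PySem.List.slice_from _ (by norm_num : (0 : Int) ≤ 0 + 1)]
      simp [bPartComma]
    · rw [if_neg hc]
      by_cases hu : PySem.Chars.find u [','] = -1
      · rw [if_pos hu]
        have ih' := ih
        rw [if_pos hu] at ih'
        rw [if_pos rfl]
        have h1 := congrArg Prod.fst ih'
        have h2 := congrArg Prod.snd ih'
        simp only [bPartComma] at h1 h2 ⊢
        rw [List.takeWhile_cons_of_pos (by simp [hc]), List.dropWhile_cons_of_pos (by simp [hc])]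
        rw [Prod.ext_iff]
        exact ⟨by simp at h1 ⊢; exact h1, by simpa using h2⟩
      · have hj0 : 0 ≤ PySem.Chars.find u [','] := by
          have := PySem.Chars.neg_one_le_find u [',']; omega
        rw [if_neg hu]
        have ih' := ih
        rw [if_neg hu, PySem.List.slice_to u hj0, PySem.List.slice_from u (by omega)] at ih'
        rw [if_neg (show ¬ (PySem.Chars.find u [','] + 1 = -1) by omega)]
        rw [PySem.List.slice_to _ (by omega), PySem.List.slice_from _ (by omega)]
        rw [show (PySem.Chars.find u [','] + 1).toNat = (PySem.Chars.find u [',']).toNat + 1 by omega]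
        rw [show (PySem.Chars.find u [','] + 1 + 1).toNat = ((PySem.Chars.find u [',']).toNat + 1) + 1 by omega]
        rw [show (PySem.Chars.find u [','] + 1).toNat = (PySem.Chars.find u [',']).toNat + 1 by omega] at ih'
        have h1 := congrArg Prod.fst ih'
        have h2 := congrArg Prod.snd ih'
        simp only [bPartComma] at h1 h2 ⊢
        rw [List.takeWhile_cons_of_pos (by simp [hc]), List.dropWhile_cons_of_pos (by simp [hc])]
        rw [List.take_succ_cons, List.drop_succ_cons]
        rw [Prod.ext_iff]
        exact ⟨by simp at h1 ⊢; exact h1, by simpa using h2⟩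

-- A's stray-skipping tail equals B's dropWhile
lemma afterclose_eq (s : List Char) : ∀ (n i : Nat) (buf : List Char), s.length - i ≤ n →
    (if s[aSkip s i]? = some ',' then (buf, s.drop (aSkip s i + 1)) else (buf, ([] : List Char)))
    = (buf, ((s.drop i).dropWhile (fun x => x ≠ ',')).drop 1) := by
  intro n
  induction n with
  | zero =>
    intro i buf h
    have hge : s.length ≤ i := by omega
    rw [aSkip, dif_neg (by omega)]
    rw [List.getElem?_eq_none hge, List.drop_eq_nil_of_le hge]
    simp
  | succ n ih =>
    intro i buf h
    by_cases hi : i < s.length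
    · have hdrop : s.drop i = s[i] :: s.drop (i + 1) := List.drop_eq_getElem_cons hi
      by_cases hc : s[i] = ','
      · rw [aSkip, dif_pos hi, if_pos hc, List.getElem?_eq_getElem hi, if_pos (by rw [hc]),
            hdrop, hc, List.dropWhile_cons_of_neg (by simp)]
        simp
      · rw [aSkip, dif_pos hi, if_neg hc, hdrop, List.dropWhile_cons_of_pos (by simp [hc])]
        exact ih (i + 1) buf (by omega)
    · have hge : s.length ≤ i := by omega
      rw [aSkip, dif_neg hi]
      rw [List.getElem?_eq_none hge, List.drop_eq_nil_of_le hge]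
      simp

-- A's quoted-field loop equals B's stack consumption
lemma quoted_eq (s : List Char) : ∀ (n i : Nat) (buf : List Char), s.length - i ≤ n →
    aQuoted s i buf = bConsume (s.drop i) buf := by
  intro n
  induction n with
  | zero =>
    intro i buf h
    rw [aQuoted, dif_neg (by omega), List.drop_eq_nil_of_le (by omega), bConsume]
  | succ n ih =>
    intro i buf h
    by_cases hi : i < s.length
    · have hdrop : s.drop i = s[i] :: s.drop (i + 1) := List.drop_eq_getElem_cons hi
      rw [aQuoted, dif_pos hi, hdrop, bConsume]
      by_cases hq : s[i] = '"'
      · by_cases hesc : s[i + 1]? = some '"'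
        · conv_rhs => rw [if_neg (show ¬ s[i] ≠ '"' by simp [hq]),
            if_pos (show (List.drop (i + 1) s).head? = some '"' by rw [List.head?_drop]; exact hesc),
            List.tail_drop]
          rw [if_pos hq, if_pos hesc]
          exact ih (i + 2) (buf ++ ['"']) (by omega)
        · conv_rhs => rw [if_neg (show ¬ s[i] ≠ '"' by simp [hq]),
            if_neg (show ¬ (List.drop (i + 1) s).head? = some '"' by rw [List.head?_drop]; exact hesc)]
          rw [if_pos hq, if_neg hesc]
          by_cases hcom : s[i + 1]? = some ','
          · rw [if_pos hcom]
            have hi1 : i + 1 < s.length := by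
              by_contra hx
              rw [List.getElem?_eq_none (by omega)] at hcom
              simp at hcom
            have hd1 : s.drop (i + 1) = s[i + 1] :: s.drop (i + 2) := List.drop_eq_getElem_cons hi1
            have hc1 : s[i + 1] = ',' := by
              rw [List.getElem?_eq_getElem hi1] at hcom
              exact Option.some.inj hcom
            conv_rhs => rw [hd1, hc1, List.dropWhile_cons_of_neg (by simp)]
            simp
          · rw [if_neg hcom]
            exact afterclose_eq s s.length (i + 1) buf (by omega)
      · rw [if_neg hq]
        conv_rhs => rw [if_pos (show s[i] ≠ '"' from hq)]
        exact ih (i + 1) (buf ++ [s[i]]) (by omega)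
    · rw [aQuoted, dif_neg hi, List.drop_eq_nil_of_le (by omega), bConsume]

lemma core_eq (line : String) : split_first_csv_field_py line = split_first_csv_field_py_alt line := by
  unfold split_first_csv_field_py split_first_csv_field_py_alt
  cases hcase : pyRstripNR line.toList with
  | nil => simp [bPartComma, PySem.List.slice]
  | cons c u =>
    have hslice : PySem.List.slice (c :: u) none (some 1) = [c] := by
      rw [show (1 : Int) = ((1 : Nat) : Int) by norm_num, PySem.List.slice_to_natCast]
      simp
    by_cases hq : c = '"'
    · subst hq
      dsimp only
      have h1 := quoted_eq ('"' :: u) ('"' :: u).length 1 [] (by omega)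
      simp only [List.drop_one, List.tail_cons] at h1
      rw [if_neg (show ¬(('"' :: u : List Char) = []) from by simp),
          if_neg (show ¬(PySem.List.pyGet? ('"' :: u) 0 ≠ some '"') from by
            simp),
          hslice,
          if_neg (show ¬((['"'] : List Char) ≠ ['"']) from by simp)]
      simp only [List.drop_succ_cons, List.drop_zero]
      rw [h1]
    · dsimp only
      have hpart := part_eq (c :: u)
      rw [if_neg (show ¬((c :: u : List Char) = []) from by simp),
          if_pos (show PySem.List.pyGet? (c :: u) 0 ≠ some '"' from by
            simp [hq]),
          hslice,
          if_pos (show ([c] : List Char) ≠ ['"'] from by simp [hq])]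
      by_cases hf : PySem.Chars.find (c :: u) [','] = -1
      · rw [if_pos hf]
        rw [if_pos hf] at hpart
        rw [← hpart]
      · rw [if_neg hf]
        rw [if_neg hf] at hpart
        rw [← hpart]

-- ===== VERDICT (by name: the statement is the Claim_ definition above) =====
theorem split_first_csv_field_py_spec : Claim_equal_split_first_csv_field_py := by
  intro line _
  unfold Spec_split_first_csv_field_py
  exact core_eq line
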